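-- pv_equiv track=rewrite | github.com/vadim-zyamalov/advent-of-code | 2017/day-21/part1.py | step
-- ===== SOURCE A (Python) =====
-- def hstack(chunk1, chunk2):
--     if chunk1 == []:
--         return chunk2
--     return [r1 + r2 for r1, r2 in zip(chunk1, chunk2)]
--
-- def vstack(chunk1, chunk2):
--     if chunk1 == []:
--         return chunk2
--     return chunk1 + chunk2
--
-- def binval(chunk):
--     num = "0b"
--     for r in chunk:
--         for el in r:
--             num += "1" if el == "#" else "0"
--     return int(num, 2)
--
-- def getchunk(image, i, j, s):
--     return [r[j : j + s] for r in image[i : i + s]]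
--
-- def step(image, rules2, rules3):
--     N = len(image)
--     result = []
--     if N % 2 == 0:
--         nc = N // 2
--         s = 2
--         for i in range(nc):
--             row = []
--             for j in range(nc):
--                 tmp = binval(getchunk(image, i * s, j * s, s))
--                 row = hstack(row, rules2[tmp])
--             result = vstack(result, row)
--     elif N % 3 == 0:
--         nc = N // 3
--         s = 3
--         for i in range(nc):
--             row = []
--             for j in range(nc):
--                 tmp = binval(getchunk(image, i * s, j * s, s))
--                 row = hstack(row, rules3[tmp])
--             result = vstack(result, row)
--     return result
-- ===== SOURCE B (Python) =====
-- def step(image, rules2, rules3):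
--     N = len(image)
--     if N % 2 == 0:
--         s, rules = 2, rules2
--     elif N % 3 == 0:
--         s, rules = 3, rules3
--     else:
--         return []
--     nc = N // s
--     result = []
--     for band in range(nc):
--         # one left-to-right scan per band computes all nc chunk codes at once
--         codes = [0] * nc
--         for row in image[band * s : band * s + s]:
--             for x, ch in enumerate(row[: nc * s]):
--                 codes[x // s] = 2 * codes[x // s] + (ch == "#")
--         mapped = [rules[c] for c in codes]
--         for line in zip(*mapped):
--             result.append("".join(line))
--     return result
-- ===== Notes on version B (the rewrite author's own statement) =====
-- stated objective: alternative
-- what changed: B drops A's per-chunk pipeline (slice each chunk out, build a '0b…' bit string, int(.,2), hstack/vstack accumulation): it scans each band of s input rows once left to right, maintaining an array of all nc chunk codes updated arithmetically (codes[x//s] = 2*codes[x//s] + bit), then emits the band's output lines by transposing the looked-up replacement chunks with zip(*mapped).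
import Mathlib
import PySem

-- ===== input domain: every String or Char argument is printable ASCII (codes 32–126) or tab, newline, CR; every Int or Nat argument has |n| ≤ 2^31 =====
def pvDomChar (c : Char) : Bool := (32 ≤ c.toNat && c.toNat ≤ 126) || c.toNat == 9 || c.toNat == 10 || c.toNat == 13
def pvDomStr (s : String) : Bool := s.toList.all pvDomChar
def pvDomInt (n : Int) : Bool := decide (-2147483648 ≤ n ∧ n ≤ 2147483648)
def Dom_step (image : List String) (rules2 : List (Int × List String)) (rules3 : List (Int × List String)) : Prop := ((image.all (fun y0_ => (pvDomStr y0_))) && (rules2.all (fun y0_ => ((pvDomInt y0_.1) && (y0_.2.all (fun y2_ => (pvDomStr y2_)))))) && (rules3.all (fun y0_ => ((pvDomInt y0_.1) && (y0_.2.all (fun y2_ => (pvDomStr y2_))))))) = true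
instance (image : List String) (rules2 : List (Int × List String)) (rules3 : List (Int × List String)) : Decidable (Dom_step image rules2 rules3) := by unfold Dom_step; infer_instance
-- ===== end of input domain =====

-- B replaces A's per-chunk pipeline (slice out each chunk, build a "0b…" bit string, parse it,
-- hstack/vstack accumulation) by a band-wise scan that maintains an array of all chunk codes of a
-- band at once (codes[x // s] = 2*codes[x // s] + bit) and assembles output lines by transposing
-- the looked-up chunks with zip; objective: alternative, not claimed faster.

-- ===== PORT A =====
def hstack (chunk1 chunk2 : List String) : List String :=
  if chunk1 = [] then chunk2
  else (chunk1.zip chunk2).map (fun p => p.1 ++ p.2)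

def vstack (chunk1 chunk2 : List String) : List String :=
  if chunk1 = [] then chunk2
  else chunk1 ++ chunk2

-- hand port of Python's int(num, 2) for exactly the strings binval builds: "0b" followed by
-- '0'/'1' digits (no sign/whitespace/underscores ever occur there), exact on those; Python
-- raises ValueError on the digitless "0b" (a chunk with no characters) — Pre_step excludes
-- that input, so the `| _ => 0` arm is never reached on admitted inputs.
def parseBin0b (s : String) : Int :=
  match s.toList with
  | '0' :: 'b' :: ds => ds.foldl (fun a c => 2 * a + (if c = '1' then 1 else 0)) 0
  | _ => 0

def binval (chunk : List String) : Int :=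
  let num := chunk.foldl (fun num r =>
    r.toList.foldl (fun num el => num ++ (if el = '#' then "1" else "0")) num) "0b"
  parseBin0b num

def getchunk (image : List String) (i j s : Int) : List String :=
  (PySem.List.slice image (some i) (some (i + s))).map
    (fun r => PySem.Str.slice r (some j) (some (j + s)))

-- `.getD []` on the rule lookups below (both ports): Python raises KeyError on a missing key;
-- Pre_step excludes that, the default is never taken on admitted inputs.
def step (image : List String) (rules2 : List (Int × List String)) (rules3 : List (Int × List String)) : List String :=
  let N : Int := PySem.List.len image
  let result : List String := []
  if PySem.Int.mod N 2 = 0 then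
    let nc := PySem.Int.floordiv N 2
    let s : Int := 2
    (PySem.List.pyRange 0 nc 1).foldl (fun result i =>
      let row := (PySem.List.pyRange 0 nc 1).foldl (fun row j =>
        let tmp := binval (getchunk image (i * s) (j * s) s)
        hstack row ((PySem.Dict.get? (PySem.Dict.mk rules2) tmp).getD [])) []
      vstack result row) result
  else if PySem.Int.mod N 3 = 0 then
    let nc := PySem.Int.floordiv N 3
    let s : Int := 3
    (PySem.List.pyRange 0 nc 1).foldl (fun result i =>
      let row := (PySem.List.pyRange 0 nc 1).foldl (fun row j =>
        let tmp := binval (getchunk image (i * s) (j * s) s)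
        hstack row ((PySem.Dict.get? (PySem.Dict.mk rules3) tmp).getD [])) []
      vstack result row) result
  else result

-- ===== PORT B =====
-- inner character loop of Source B: `for x, ch in enumerate(row[: nc*s]): codes[x//s] = 2*codes[x//s] + (ch == "#")`.
-- The read `codes[x // s]` is ported as pyGetD with default 0: x // s < nc always (x < nc*s), so
-- Python never raises there and the default is never taken.
def rowScan (s : Int) (codes : List Int) (ps : List (Int × Char)) : List Int :=
  ps.foldl (fun codes p =>
    PySem.List.pySetD codes (PySem.Int.floordiv p.1 s)
      (2 * PySem.List.pyGetD codes (PySem.Int.floordiv p.1 s) 0 +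
        (if p.2 = '#' then 1 else 0))) codes

-- `codes = [0]*nc`: nc = N // s ≥ 0 here, so `.toNat` is exact
def bandCodes (image : List String) (band nc s : Int) : List Int :=
  (PySem.List.slice image (some (band * s)) (some (band * s + s))).foldl
    (fun codes r =>
      rowScan s codes
        (PySem.List.enumerate (PySem.Str.slice r none (some (nc * s))).toList 0))
    (List.replicate nc.toNat 0)

def minH : List (List String) → Nat
  | [] => 0
  | c :: t => t.foldl (fun m x => min m x.length) c.length

-- contract port of the builtin zip(*mapped): no rows for zip() of no iterables, else one row per
-- index below the minimum length, transposed
def pyZip (ls : List (List String)) : List (List String) :=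
  match ls with
  | [] => []
  | _ => (List.range (minH ls)).map (fun r => ls.map (fun c => c.getD r ""))

def stepBand (image : List String) (rules : List (Int × List String)) (s : Int) : List String :=
  let nc := PySem.Int.floordiv (PySem.List.len image) s
  (PySem.List.pyRange 0 nc 1).foldl (fun result band =>
    let codes := bandCodes image band nc s
    let mapped := codes.map (fun c => (PySem.Dict.get? (PySem.Dict.mk rules) c).getD [])
    (pyZip mapped).foldl (fun result line => result ++ [PySem.Str.join "" line]) result) []

def step_alt (image : List String) (rules2 : List (Int × List String)) (rules3 : List (Int × List String)) : List String :=
  let N : Int := PySem.List.len image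
  if PySem.Int.mod N 2 = 0 then stepBand image rules2 2
  else if PySem.Int.mod N 3 = 0 then stepBand image rules3 3
  else []

-- ===== PRECONDITION & SPEC =====
-- Pre_step excludes (a) inputs where Python A raises: a used chunk code missing from the rule
-- table (KeyError), or a chunk containing no characters because image rows are shorter than the
-- image is tall (int("0b", 2) is a ValueError); and (b) rule tables that map a used chunk code
-- to an empty replacement chunk — a degenerate corner no real rule set contains, on which A's
-- empty-seeded zip accumulator drops the chunks accumulated so far in that row while B's
-- zip-transposition drops the row: both values are accidental and neither is the one a
-- specification would pick.
def PreBlocks (image : List String) (rules : List (Int × List String)) (s : Int) : Prop :=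
  let nc := PySem.Int.floordiv (PySem.List.len image) s
  ∀ i ∈ PySem.List.pyRange 0 nc 1, ∀ j ∈ PySem.List.pyRange 0 nc 1,
    ((getchunk image (i * s) (j * s) s).any (fun r => !r.toList.isEmpty)) = true ∧
    (PySem.Dict.get? (PySem.Dict.mk rules) (binval (getchunk image (i * s) (j * s) s))).getD [] ≠ []

def Pre_step (image : List String) (rules2 : List (Int × List String)) (rules3 : List (Int × List String)) : Prop :=
  let N : Int := PySem.List.len image
  if PySem.Int.mod N 2 = 0 then PreBlocks image rules2 2
  else if PySem.Int.mod N 3 = 0 then PreBlocks image rules3 3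
  else True

instance (image : List String) (rules2 : List (Int × List String)) (rules3 : List (Int × List String)) : Decidable (Pre_step image rules2 rules3) := by
  unfold Pre_step PreBlocks; infer_instance

def pvWitness_step : List String × (List (Int × List String)) × (List (Int × List String)) :=
  (["##", "#."], [(14, ["#..", ".#.", "..#"])], [])

def Spec_step (image : List String) (rules2 : List (Int × List String)) (rules3 : List (Int × List String)) (out : List String) : Prop := out = step_alt image rules2 rules3
instance (image : List String) (rules2 : List (Int × List String)) (rules3 : List (Int × List String)) (out : List String) : Decidable (Spec_step image rules2 rules3 out) := by unfold Spec_step; infer_instance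

-- ===== CLAIM (what is proved, stated in full; the proofs are below) =====
def Claim_equal_step : Prop := ∀ (image : List String) (rules2 : List (Int × List String)) (rules3 : List (Int × List String)), Dom_step image rules2 rules3 → Pre_step image rules2 rules3 → Spec_step image rules2 rules3 (step image rules2 rules3)

-- ===== LEMMAS AND PROOFS =====

-- ---- proof-only common form: the per-chunk bit fold ----
def bitsFold (cs : List Char) (v : Int) : Int :=
  cs.foldl (fun v ch => 2 * v + (if ch = '#' then 1 else 0)) v

def chunkCode (image : List String) (i j s : Int) : Int :=
  (PySem.List.slice image (some i) (some (i + s))).foldl (fun v r =>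
    bitsFold (PySem.Str.slice r (some j) (some (j + s))).toList v) 0

-- ---- A: binval ∘ getchunk is the bit fold ----
theorem bits_build_toList (cs : List Char) (s0 : String) :
    (cs.foldl (fun num el => num ++ (if el = '#' then "1" else "0")) s0).toList
    = s0.toList ++ cs.map (fun el => if el = '#' then '1' else '0') := by
  induction cs generalizing s0 with
  | nil => simp
  | cons c t ih =>
    simp only [List.foldl_cons, List.map_cons, ih, String.toList_append]
    by_cases h : c = '#' <;> simp [h]

theorem num_build_toList (rows : List String) (s0 : String) :
    (rows.foldl (fun num r => r.toList.foldl (fun num el => num ++ (if el = '#' then "1" else "0")) num) s0).toList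
    = s0.toList ++ rows.flatMap (fun r => r.toList.map (fun el => if el = '#' then '1' else '0')) := by
  induction rows generalizing s0 with
  | nil => simp
  | cons r t ih => simp [ih, bits_build_toList]

theorem parse_bits_eq (rows : List String) (v : Int) :
    (rows.flatMap (fun r => r.toList.map (fun el => if el = '#' then '1' else '0'))).foldl
      (fun a c => 2 * a + (if c = '1' then 1 else 0)) v
    = rows.foldl (fun v r => bitsFold r.toList v) v := by
  induction rows generalizing v with
  | nil => rfl
  | cons r t ih =>
    simp only [List.flatMap_cons, List.foldl_append, List.foldl_cons]
    rw [← ih]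
    congr 1
    simp only [List.foldl_map, bitsFold]
    apply PySem.List.foldl_congr_mem
    intro a ch _
    by_cases h : ch = '#' <;> simp [h]

theorem bin_eq (image : List String) (i j s : Int) :
    binval (getchunk image i j s) = chunkCode image i j s := by
  unfold binval chunkCode getchunk parseBin0b
  simp only []
  rw [num_build_toList]
  have h0b : "0b".toList = ['0', 'b'] := rfl
  rw [h0b]
  simp only [List.cons_append, List.nil_append]
  exact (parse_bits_eq _ 0).trans (by rw [List.foldl_map])

-- ---- B: the band scan computes the chunk codes ----
theorem rowScan_shift (s : Nat) (hs : 0 < s) (cs : List Char) (n : Nat) (c0 : Int) (codes : List Int) :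
    rowScan (s : Int) (c0 :: codes) (PySem.List.enumerate cs ((n + s : Nat) : Int))
    = c0 :: rowScan (s : Int) codes (PySem.List.enumerate cs ((n : Nat) : Int)) := by
  induction cs generalizing n c0 codes with
  | nil => simp [rowScan, PySem.List.enumerate_nil]
  | cons c t ih =>
    rw [PySem.List.enumerate_cons, PySem.List.enumerate_cons]
    unfold rowScan
    simp only [List.foldl_cons]
    rw [PySem.Int.floordiv_natCast, PySem.Int.floordiv_natCast,
      Nat.add_div_right n hs]
    simp only [PySem.List.pySetD_natCast, PySem.List.pyGetD_natCast,
      List.set_cons_succ, List.getD_cons_succ]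
    have h1 : ((n + s : Nat) : Int) + 1 = ((n + 1 + s : Nat) : Int) := by push_cast; ring
    have h2 : ((n : Nat) : Int) + 1 = ((n + 1 : Nat) : Int) := by push_cast; ring
    rw [h1, h2]
    exact ih (n + 1) c0 _

theorem rowScan_base (s : Nat) (cs : List Char) (n : Nat) (c0 : Int) (codes : List Int)
    (h : n + cs.length ≤ s) :
    rowScan (s : Int) (c0 :: codes) (PySem.List.enumerate cs ((n : Nat) : Int))
    = bitsFold cs c0 :: codes := by
  induction cs generalizing n c0 with
  | nil => simp [rowScan, PySem.List.enumerate_nil, bitsFold]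
  | cons c t ih =>
    rw [PySem.List.enumerate_cons]
    unfold rowScan
    simp only [List.foldl_cons]
    rw [PySem.Int.floordiv_natCast, Nat.div_eq_of_lt (by simp at h; omega)]
    simp only [PySem.List.pySetD_natCast, PySem.List.pyGetD_natCast,
      List.set_cons_zero, List.getD_cons_zero]
    have h2 : ((n : Nat) : Int) + 1 = ((n + 1 : Nat) : Int) := by push_cast; ring
    rw [h2]
    have hih := ih (n := n + 1) (c0 := 2 * c0 + (if c = '#' then 1 else 0)) (by simp at h ⊢; omega)
    unfold rowScan at hih
    rw [hih]
    simp [bitsFold]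

-- the per-row result, chunk by chunk
def rowStep (s : Nat) : List Int → List Char → List Int
  | [], _ => []
  | c0 :: rest, cs => bitsFold (cs.take s) c0 :: rowStep s rest (cs.drop s)

theorem rowStep_nil (s : Nat) (codes : List Int) : rowStep s codes [] = codes := by
  induction codes with
  | nil => rfl
  | cons c t ih => simp [rowStep, bitsFold, ih]

theorem rowScan_eq_rowStep (s : Nat) (hs : 0 < s) (codes : List Int) (cs : List Char) :
    rowScan (s : Int) codes (PySem.List.enumerate (cs.take (codes.length * s)) 0)
    = rowStep s codes cs := by
  induction codes generalizing cs with
  | nil => simp [rowScan, PySem.List.enumerate_nil, rowStep]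
  | cons c0 rest ih =>
    have hsplit : cs.take ((c0 :: rest).length * s) = cs.take s ++ (cs.drop s).take (rest.length * s) := by
      rw [← List.take_add]
      congr 1
      simp [Nat.succ_mul, Nat.add_comm]
    rw [hsplit, PySem.List.enumerate_append]
    unfold rowScan
    rw [List.foldl_append]
    have hbase := rowScan_base s (cs.take s) 0 c0 rest (by simp)
    norm_num at hbase
    unfold rowScan at hbase
    rw [hbase]
    by_cases hlen : cs.length ≤ s
    · have hd : cs.drop s = [] := by simp [List.drop_eq_nil_iff, hlen]
      rw [hd]
      simp [PySem.List.enumerate_nil, rowStep, hd, rowStep_nil]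
    · have ht : (cs.take s).length = s := by simp; omega
      rw [ht]
      have hshift := rowScan_shift s hs ((cs.drop s).take (rest.length * s)) 0
        (bitsFold (cs.take s) c0) rest
      norm_num at hshift
      unfold rowScan at hshift
      rw [show ((0:Int) + (s : Int)) = (s : Int) by ring, hshift]
      have hih := ih (cs.drop s)
      unfold rowScan at hih
      rw [hih]
      rfl

theorem rowStep_map_range (s : Nat) (m : Nat) (g : Nat → Int) (cs : List Char) :
    rowStep s ((List.range m).map g) cs
    = (List.range m).map (fun j => bitsFold ((cs.drop (j * s)).take s) (g j)) := by
  induction m generalizing g cs with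
  | zero => rfl
  | succ m ih =>
    rw [List.range_succ_eq_map, List.map_cons, List.map_cons, List.map_map, List.map_map]
    show bitsFold (cs.take s) (g 0) :: rowStep s ((List.range m).map (g ∘ Nat.succ)) (cs.drop s) = _
    rw [ih (g ∘ Nat.succ) (cs.drop s)]
    simp only [Function.comp_def, List.drop_drop]
    congr 1
    · simp
    · apply List.map_congr_left
      intro j _
      congr 3
      simp [Nat.succ_mul, Nat.add_comm]

theorem slice_from_chars (r : String) (a b : Nat) :
    (PySem.Str.slice r (some ((a : Nat) : Int)) (some (((a : Nat) : Int) + ((b : Nat) : Int)))).toList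
    = (r.toList.drop a).take b := by
  rw [PySem.Str.toList_slice]
  exact PySem.List.slice_natCast_add r.toList a b

theorem slice_to_chars (r : String) (b : Nat) :
    (PySem.Str.slice r none (some ((b : Nat) : Int))).toList = r.toList.take b := by
  rw [PySem.Str.toList_slice]
  exact PySem.List.slice_to_natCast r.toList b

theorem foldRows_eq (s m : Nat) (hs : 0 < s) (rows : List String) (g : Nat → Int) :
    rows.foldl (fun codes r =>
      rowScan (s : Int) codes
        (PySem.List.enumerate (PySem.Str.slice r none (some (((m : Nat) : Int) * ((s : Nat) : Int)))).toList 0))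
      ((List.range m).map g)
    = (List.range m).map (fun j => rows.foldl (fun v r => bitsFold ((r.toList.drop (j * s)).take s) v) (g j)) := by
  induction rows generalizing g with
  | nil => rfl
  | cons r t ih =>
    simp only [List.foldl_cons]
    have hslice : (PySem.Str.slice r none (some (((m : Nat) : Int) * ((s : Nat) : Int)))).toList
        = r.toList.take (m * s) := by
      rw [show ((m : Nat) : Int) * ((s : Nat) : Int) = ((m * s : Nat) : Int) by push_cast; ring]
      exact slice_to_chars r (m * s)
    rw [hslice,
      show m * s = ((List.range m).map g).length * s by simp,
      rowScan_eq_rowStep s hs, rowStep_map_range,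
      ih (fun j => bitsFold ((r.toList.drop (j * s)).take s) (g j))]

theorem bandCodes_eq (image : List String) (band : Int) (m s : Nat) (hs : 0 < s) :
    bandCodes image band ((m : Nat) : Int) ((s : Nat) : Int)
    = (List.range m).map (fun j => chunkCode image (band * ((s : Nat) : Int)) (((j : Nat) : Int) * ((s : Nat) : Int)) ((s : Nat) : Int)) := by
  unfold bandCodes
  rw [show (List.replicate (((m : Nat) : Int)).toNat (0 : Int)) = (List.range m).map (fun _ => (0 : Int)) by
    simp [List.map_const']]
  rw [foldRows_eq s m hs]
  apply List.map_congr_left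
  intro j _
  unfold chunkCode
  apply PySem.List.foldl_congr_mem
  intro v r _
  congr 1
  rw [show (((j : Nat) : Int) * ((s : Nat) : Int)) = ((j * s : Nat) : Int) by push_cast; ring]
  exact (slice_from_chars r (j * s) s).symm

-- ---- strings: join / lineOf machinery ----
def lineOf (L : List (List String)) (r : Int) : String :=
  PySem.Str.join "" (L.map (fun c => PySem.List.pyGetD c r ""))

def rowOut (L : List (List String)) : List String :=
  (PySem.List.pyRange 0 ((minH L : Nat) : Int) 1).map (lineOf L)

theorem joinStr_cons (x : String) (l : List String) :
    PySem.Str.join "" (x :: l) = x ++ PySem.Str.join "" l := by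
  apply String.toList_inj.mp
  cases l with
  | nil =>
    simp [PySem.Str.toList_join, PySem.Chars.join_singleton, PySem.Chars.join_nil,
      String.toList_append]
  | cons y t =>
    simp [PySem.Str.toList_join, PySem.Chars.join_cons_cons, String.toList_append]

theorem lineOf_cons (c : List String) (t : List (List String)) (r : Int) :
    lineOf (c :: t) r = PySem.List.pyGetD c r "" ++ lineOf t r := by
  simp [lineOf, joinStr_cons]

theorem lineOf_nil (r : Int) : lineOf [] r = "" := by
  apply String.toList_inj.mp
  simp [lineOf, PySem.Str.toList_join, PySem.Chars.join_nil]

theorem rowOut_single (a : List String) : rowOut [a] = a := by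
  unfold rowOut
  have h1 : minH [a] = a.length := rfl
  rw [h1, PySem.List.pyRange_zero_nat, List.map_map]
  apply List.ext_getElem (by simp)
  intro k h1 h2
  simp only [List.getElem_map, List.getElem_range, Function.comp_apply]
  rw [lineOf_cons, lineOf_nil,
    PySem.List.pyGetD_eq_getElem a "" (by positivity) (by simpa using h2)]
  simp

theorem foldl_min_le (t : List (List String)) (m : Nat) :
    t.foldl (fun m x => min m x.length) m ≤ m := by
  induction t generalizing m with
  | nil => simp
  | cons c t ih => exact le_trans (ih _) (by simp)

theorem minH_le_head (c : List String) (t : List (List String)) :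
    minH (c :: t) ≤ c.length := foldl_min_le t c.length

theorem rowOut_merge (a c : List String) (t : List (List String)) :
    rowOut ((a.zip c).map (fun p => p.1 ++ p.2) :: t) = rowOut (a :: c :: t) := by
  have hz : ((a.zip c).map (fun p => p.1 ++ p.2)).length = min a.length c.length := by simp
  have hm : minH ((a.zip c).map (fun p => p.1 ++ p.2) :: t) = minH (a :: c :: t) := by
    simp [minH, hz]
  unfold rowOut
  rw [hm]
  apply List.map_congr_left
  intro r hr
  rw [PySem.List.mem_pyRange_one] at hr
  obtain ⟨h0, hrlt⟩ := hr
  have hmin : minH (a :: c :: t) ≤ min a.length c.length := by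
    have := minH_le_head ((a.zip c).map (fun p => p.1 ++ p.2)) t
    rw [hm, hz] at this; exact this
  have hra : r < (a.length : Int) := by omega
  have hrc : r < (c.length : Int) := by omega
  have hrz : r < (((a.zip c).map (fun p => p.1 ++ p.2)).length : Int) := by
    rw [hz]; push_cast; omega
  rw [lineOf_cons, lineOf_cons, lineOf_cons,
    PySem.List.pyGetD_eq_getElem _ "" h0 hrz,
    PySem.List.pyGetD_eq_getElem a "" h0 hra,
    PySem.List.pyGetD_eq_getElem c "" h0 hrc]
  simp only [List.getElem_map, List.getElem_zip]
  rw [String.append_assoc]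

theorem hstack_ne_nil (a c : List String) (ha : a ≠ []) (hc : c ≠ []) :
    hstack a c ≠ [] := by
  unfold hstack
  rw [if_neg ha]
  simp [List.zip_eq_nil_iff, ha, hc]

theorem hstack_fold_aux (t : List (List String)) (h : ∀ c ∈ t, c ≠ []) :
    ∀ a, a ≠ [] → t.foldl hstack a = rowOut (a :: t) := by
  induction t with
  | nil => intro a _; simp [rowOut_single]
  | cons c t ih =>
    intro a ha
    have hc : c ≠ [] := h c (by simp)
    have ht : ∀ x ∈ t, x ≠ [] := fun x hx => h x (by simp [hx])
    simp only [List.foldl_cons]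
    have hac : hstack a c = (a.zip c).map (fun p => p.1 ++ p.2) := by
      unfold hstack; rw [if_neg ha]
    rw [ih ht (hstack a c) (hstack_ne_nil a c ha hc), hac, rowOut_merge]

theorem hstack_fold_eq (cs : List (List String)) (h : ∀ c ∈ cs, c ≠ []) :
    cs.foldl hstack [] = rowOut cs := by
  cases cs with
  | nil => rfl
  | cons c t =>
    simp only [List.foldl_cons]
    have h1 : hstack [] c = c := by unfold hstack; simp
    rw [h1, hstack_fold_aux t (fun x hx => h x (by simp [hx])) c (h c (by simp))]

-- ---- B: zip-transpose-then-join is rowOut ----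
theorem pyZip_map_join (L : List (List String)) :
    (pyZip L).map (fun line => PySem.Str.join "" line) = rowOut L := by
  cases L with
  | nil => rfl
  | cons c t =>
    unfold pyZip rowOut
    rw [PySem.List.pyRange_zero_nat, List.map_map, List.map_map]
    apply List.map_congr_left
    intro k hk
    simp only [Function.comp_apply, lineOf]
    congr 1
    apply List.map_congr_left
    intro x hx
    rw [PySem.List.pyGetD_natCast]

-- ---- one divisibility branch ----
theorem vstack_eq (a b : List String) : vstack a b = a ++ b := by
  unfold vstack; split_ifs with h <;> simp [h]

theorem row_eq (val : Int → List String) (R : List Int) (h : ∀ j ∈ R, val j ≠ []) :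
    R.foldl (fun row j => hstack row (val j)) [] = rowOut (R.map val) := by
  rw [← List.foldl_map]
  refine hstack_fold_eq _ ?_
  intro c hc
  obtain ⟨j, hj, rfl⟩ := List.mem_map.mp hc
  exact h j hj

theorem blocks_eq (image : List String) (rules : List (Int × List String)) (s : Int) (sn : Nat)
    (hsn : s = ((sn : Nat) : Int)) (hpos : 0 < sn)
    (hpre : PreBlocks image rules s) :
    (PySem.List.pyRange 0 (PySem.Int.floordiv (PySem.List.len image) s) 1).foldl (fun result i =>
      vstack result ((PySem.List.pyRange 0 (PySem.Int.floordiv (PySem.List.len image) s) 1).foldl (fun row j =>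
        hstack row ((PySem.Dict.get? (PySem.Dict.mk rules) (binval (getchunk image (i * s) (j * s) s))).getD [])) []))
      []
      = stepBand image rules s := by
  subst hsn
  unfold PreBlocks at hpre
  unfold stepBand
  simp only [vstack_eq, PySem.List.foldl_append_singleton_eq_map,
    PySem.List.foldl_append_eq_flatMap, List.nil_append]
  apply List.flatMap_congr
  intro i hi
  rw [row_eq _ _ (fun j hj => (hpre i hi j hj).2), pyZip_map_join,
    PySem.List.len_eq, PySem.Int.floordiv_natCast,
    bandCodes_eq image i (image.length / sn) sn hpos, List.map_map]
  congr 1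
  rw [PySem.List.pyRange_zero_nat, List.map_map]
  apply List.map_congr_left
  intro k _
  simp only [Function.comp_apply]
  rw [bin_eq]

-- ===== VERDICT (by name: the statement is the Claim_ definition above) =====
theorem step_spec : Claim_equal_step := by
  intro image rules2 rules3 _hdom hpre
  unfold Spec_step step step_alt Pre_step at *
  simp only [] at hpre ⊢
  split_ifs at hpre ⊢ with h2 h3
  · exact blocks_eq image rules2 2 2 (by norm_num) (by norm_num) hpre
  · exact blocks_eq image rules3 3 3 (by norm_num) (by norm_num) hpre
  · rfl
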